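-- pv_equiv track=rewrite | github.com/kazukig/Chenge_UnsignedAndSigned | project/analyzer/CodeAnalyzer.py | _find_token_col_in_src
-- ===== SOURCE A (Python) =====
-- def _find_token_col_in_src(line_str: str, token_spelling: str, near_col_1based=None):
--     """実ソース行で token_spelling が現れる列(1始まり)を返す。near_col があれば最寄りを返す。"""
--     if not line_str or not token_spelling:
--         return None
--     hits = []
--     start = 0
--     while True:
--         k = line_str.find(token_spelling, start)
--         if k < 0:
--             break
--         hits.append(k + 1)
--         start = k + 1
--     if not hits:
--         return None
--     if near_col_1based is None:
--         return hits[0]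
--     near = int(near_col_1based)
--     return min(hits, key=lambda c: abs(c - near))
-- ===== SOURCE B (Python) =====
-- def _find_token_col_in_src(line_str: str, token_spelling: str, near_col_1based=None):
--     """Bidirectional neighbor search: no enumeration of all hits.  The nearest
--     occurrence is either the last hit strictly left of near (one rfind) or the
--     first hit at/right of near (one find); compare the two distances, with <=
--     keeping the left (smaller-column) one on ties."""
--     if not line_str or not token_spelling:
--         return None
--     if near_col_1based is None:
--         k = line_str.find(token_spelling)
--         return k + 1 if k >= 0 else None
--     near = int(near_col_1based)
--     m = len(token_spelling)
--     right = line_str.find(token_spelling, max(near - 1, 0))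
--     left = line_str.rfind(token_spelling, 0, near - 2 + m) if near >= 2 else -1
--     if left < 0 and right < 0:
--         return None
--     if left < 0:
--         return right + 1
--     if right < 0:
--         return left + 1
--     return left + 1 if near - (left + 1) <= (right + 1) - near else right + 1
-- ===== Notes on version B (the rewrite author's own statement) =====
-- stated objective: alternative
-- what changed: Replaced A's enumerate-every-occurrence-then-min scheme (a find loop building a hits list, then hits[0] or min(hits, key=abs-distance)) by a bidirectional neighbor search: one find() starting at near-1 gives the first hit at or right of near, one end-bounded rfind() gives the last hit strictly left of it, and the answer is whichever of the two columns is closer (<= keeps the left one, reproducing min's leftmost tie-break); no list of hits is ever built.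
import Mathlib
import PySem

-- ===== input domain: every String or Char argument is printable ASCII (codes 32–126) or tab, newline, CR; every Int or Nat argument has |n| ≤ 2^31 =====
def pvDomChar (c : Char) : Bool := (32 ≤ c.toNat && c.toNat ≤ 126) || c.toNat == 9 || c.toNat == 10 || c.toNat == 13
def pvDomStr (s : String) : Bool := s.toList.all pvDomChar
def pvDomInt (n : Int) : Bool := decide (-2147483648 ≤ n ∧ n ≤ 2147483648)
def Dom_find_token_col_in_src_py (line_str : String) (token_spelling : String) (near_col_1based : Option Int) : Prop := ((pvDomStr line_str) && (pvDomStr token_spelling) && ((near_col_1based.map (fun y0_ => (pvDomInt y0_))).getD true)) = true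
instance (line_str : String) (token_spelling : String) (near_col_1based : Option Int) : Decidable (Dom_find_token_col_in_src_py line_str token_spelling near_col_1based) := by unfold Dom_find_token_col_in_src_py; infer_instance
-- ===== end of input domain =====

-- B replaces A's enumerate-all-hits-then-min scheme by a bidirectional neighbor
-- search (one find right of near, one bounded rfind left of it) — no hit list at
-- all (objective: alternative algorithm).


-- ===== PORT A =====
-- bounds of a successful findFrom with a Nat start: needed for termination of A's while loop
theorem pv_findFrom_bounds (l tok : List Char) (start : Nat)
    (h : 0 ≤ PySem.Chars.findFrom l tok (start : Int)) :
    (start : Int) ≤ PySem.Chars.findFrom l tok (start : Int) ∧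
      PySem.Chars.findFrom l tok (start : Int) ≤ (l.length : Int) := by
  by_cases hle : start ≤ l.length
  · rw [PySem.Chars.findFrom_natCast l tok start hle] at h ⊢
    have h1 := PySem.Chars.neg_one_le_find (l.drop start) tok
    have h2 := PySem.Chars.find_le_length (l.drop start) tok
    have hlen : (l.drop start).length = l.length - start := by simp
    rw [hlen] at h2
    by_cases hneg1 : PySem.Chars.find (l.drop start) tok = -1
    · rw [if_pos hneg1] at h; omega
    · rw [if_neg hneg1] at h ⊢; omega
  · exfalso
    simp only [PySem.Chars.findFrom] at h
    split_ifs at h <;> omega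

-- the 'while True: k = line_str.find(token, start); …' loop of A, collecting hits (= k+1)
def collectA (l tok : List Char) (start : Nat) : List Int :=
  let k := PySem.Chars.findFrom l tok (start : Int)
  if h : k < 0 then []
  else (k + 1) :: collectA l tok (k.toNat + 1)
termination_by l.length + 1 - start
decreasing_by
  have hb := pv_findFrom_bounds l tok start (by omega)
  omega

def find_token_col_in_src_py (line_str : String) (token_spelling : String) (near_col_1based : Option Int) : Option Int :=
  if line_str = "" || token_spelling = "" then none
  else
    let hits := collectA line_str.toList token_spelling.toList 0
    if hits = [] then none
    else
      match near_col_1based with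
      | none => PySem.List.pyGet? hits 0
      | some nc =>
        let near : Int := nc  -- int() on an int is the identity
        PySem.List.min? hits (fun c => (c - near).natAbs)

-- ===== PORT B =====
def find_token_col_in_src_py_alt (line_str : String) (token_spelling : String) (near_col_1based : Option Int) : Option Int :=
  if line_str = "" || token_spelling = "" then none
  else
    match near_col_1based with
    | none =>
      let k := PySem.Str.find line_str token_spelling
      if 0 ≤ k then some (k + 1) else none
    | some nc =>
      let near : Int := nc  -- int() on an int is the identity
      let m : Int := PySem.Str.len token_spelling
      let right := PySem.Str.findFrom line_str token_spelling (max (near - 1) 0)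
      let left := if 2 ≤ near then PySem.Str.rfindFrom line_str token_spelling 0 (some (near - 2 + m)) else -1
      if left < 0 && right < 0 then none
      else if left < 0 then some (right + 1)
      else if right < 0 then some (left + 1)
      else if near - (left + 1) ≤ (right + 1) - near then some (left + 1) else some (right + 1)

-- ===== PRECONDITION & SPEC =====
def Spec_find_token_col_in_src_py (line_str : String) (token_spelling : String) (near_col_1based : Option Int) (out : Option Int) : Prop := out = find_token_col_in_src_py_alt line_str token_spelling near_col_1based
instance (line_str : String) (token_spelling : String) (near_col_1based : Option Int) (out : Option Int) : Decidable (Spec_find_token_col_in_src_py line_str token_spelling near_col_1based out) := by unfold Spec_find_token_col_in_src_py; infer_instance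

-- ===== CLAIM (what is proved, stated in full; the proofs are below) =====
def Claim_equal_find_token_col_in_src_py : Prop := ∀ (line_str : String) (token_spelling : String) (near_col_1based : Option Int), Dom_find_token_col_in_src_py line_str token_spelling near_col_1based → Spec_find_token_col_in_src_py line_str token_spelling near_col_1based (find_token_col_in_src_py line_str token_spelling near_col_1based)

-- ===== LEMMAS AND PROOFS =====

-- the match predicate: the token occurs at position k
def pvP (l tok : List Char) (k : Nat) : Bool := PySem.Chars.startswith (l.drop k) tok

theorem pvP_iff (l tok : List Char) (k : Nat) : pvP l tok k = true ↔ tok <+: l.drop k := by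
  simp [pvP, PySem.Chars.startswith, List.isPrefixOf_iff_prefix]

-- the column of a match position
def pvF (k : Nat) : Int := (k : Int) + 1

-- the list of all match positions, in increasing order
def pvH (l tok : List Char) : List Nat := (List.range l.length).filter (pvP l tok)

theorem pvH_pairwise (l tok : List Char) : (pvH l tok).Pairwise (· < ·) :=
  List.pairwise_lt_range.filter _

theorem pvH_mem (l tok : List Char) (htok : tok ≠ []) (k : Nat) :
    k ∈ pvH l tok ↔ tok <+: l.drop k := by
  unfold pvH
  rw [List.mem_filter, List.mem_range, pvP_iff]
  constructor
  · exact fun h => h.2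
  · intro h
    refine ⟨?_, h⟩
    by_contra hk
    rw [not_lt] at hk
    have : l.drop k = [] := List.drop_eq_nil_of_le hk
    rw [this] at h
    exact htok (List.prefix_nil.mp h)

theorem pvH_mem_le (l tok : List Char) (htok : tok ≠ []) (k : Nat) (hk : k ∈ pvH l tok) :
    k + tok.length ≤ l.length := by
  have h := (pvH_mem l tok htok k).mp hk
  have h1 := h.length_le
  simp only [List.length_drop] at h1
  have h2 : k < l.length := List.mem_range.mp (List.mem_filter.mp hk).1
  omega

-- A's hits list is exactly the (k+1) for matching positions k ≥ start, in order
theorem collectA_eq (l tok : List Char) (htok : tok ≠ []) :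
    ∀ m start, start ≤ l.length → l.length - start ≤ m →
      collectA l tok start =
        ((List.range' start (l.length - start)).filter (pvP l tok)).map pvF := by
  intro m
  induction m with
  | zero =>
    intro start hle hm
    have hstart : start = l.length := by omega
    subst hstart
    rw [collectA]
    have : PySem.Chars.findFrom l tok (l.length : Int) = -1 := by
      rw [PySem.Chars.findFrom_natCast_eq_neg_one_iff l tok l.length le_rfl]
      simp [List.drop_length]
      intro h; exact htok h
    simp [this]
  | succ m ih =>
    intro start hle hm
    rw [collectA]
    by_cases hneg : PySem.Chars.findFrom l tok (start : Int) < 0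
    · have hm1 : PySem.Chars.findFrom l tok (start : Int) = -1 := by
        rw [PySem.Chars.findFrom_natCast l tok start hle] at hneg ⊢
        by_cases hr : PySem.Chars.find (l.drop start) tok = -1
        · rw [if_pos hr]
        · rw [if_neg hr] at hneg
          have := PySem.Chars.neg_one_le_find (l.drop start) tok
          omega
      have hno : ¬ tok <:+: l.drop start :=
        (PySem.Chars.findFrom_natCast_eq_neg_one_iff l tok start hle).mp hm1
      have hfilt : (List.range' start (l.length - start)).filter (pvP l tok) = [] := by
        rw [List.filter_eq_nil_iff]
        intro a ha hpa
        rw [List.mem_range'_1] at ha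
        apply hno
        have hpre : tok <+: l.drop a := (pvP_iff l tok a).mp hpa
        have : l.drop a = (l.drop start).drop (a - start) := by
          rw [List.drop_drop]; congr 1; omega
        rw [this] at hpre
        exact hpre.isInfix.trans (List.drop_suffix _ _).isInfix
      simp [hneg, hfilt]
    · rw [not_lt] at hneg
      have hne : PySem.Chars.findFrom l tok (start : Int) ≠ -1 := by omega
      obtain ⟨hge, hpre, hmin⟩ := PySem.Chars.findFrom_natCast_spec l tok start hle hne
      set kI := PySem.Chars.findFrom l tok (start : Int) with hkI
      set j := kI.toNat with hj
      have hjge : start ≤ j := by omega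
      have hjlt : j < l.length := by
        by_contra hc
        rw [not_lt] at hc
        have : l.drop j = [] := List.drop_eq_nil_of_le hc
        rw [this] at hpre
        exact htok (List.prefix_nil.mp hpre)
      have hsplit : List.range' start (l.length - start)
          = List.range' start (j - start) ++ j :: List.range' (j + 1) (l.length - (j + 1)) := by
        have h1 : List.range' start (j - start) 1 ++ List.range' (start + 1 * (j - start)) ((l.length - start) - (j - start)) 1
            = List.range' start ((j - start) + ((l.length - start) - (j - start))) 1 :=
          List.range'_append ..
        have h2 : start + 1 * (j - start) = j := by omega
        have h3 : (l.length - start) - (j - start) = (l.length - (j + 1)) + 1 := by omega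
        rw [h2, h3] at h1
        rw [show (j - start) + ((l.length - (j + 1)) + 1) = l.length - start from by omega,
          List.range'_succ] at h1
        exact h1.symm
      have hfilt1 : (List.range' start (j - start)).filter (pvP l tok) = [] := by
        rw [List.filter_eq_nil_iff]
        intro a ha hpa
        rw [List.mem_range'_1] at ha
        exact hmin a ha.1 (by omega) ((pvP_iff l tok a).mp hpa)
      have hpj : pvP l tok j = true := (pvP_iff l tok j).mpr hpre
      have hrec := ih (j + 1) (by omega) (by omega)
      rw [dif_neg (by omega)]
      rw [hsplit, List.filter_append, hfilt1, List.nil_append, List.filter_cons_of_pos hpj,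
        List.map_cons, ← hrec]
      have hji : pvF j = kI + 1 := by unfold pvF; omega
      rw [hji]

theorem pv_hits_eq (l tok : List Char) (htok : tok ≠ []) :
    collectA l tok 0 = (pvH l tok).map pvF := by
  have h := collectA_eq l tok htok l.length 0 (Nat.zero_le _) (by omega)
  rw [h]
  unfold pvH
  rw [Nat.sub_zero, List.range_eq_range']

-- ---- min? machinery ----

def pvStep (key : Int → Nat) (acc : Option Int) (x : Int) : Option Int :=
  match acc with
  | none => some x
  | some b => if key x < key b then some x else some b

theorem pv_min?_eq (xs : List Int) (key : Int → Nat) :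
    PySem.List.min? xs key = List.foldl (pvStep key) none xs := by
  unfold PySem.List.min?
  congr 1
  funext acc x
  cases acc <;> rfl

theorem pv_min?_keep (key : Int → Nat) (m : Int) :
    ∀ post : List Int, (∀ y ∈ post, key m ≤ key y) →
      List.foldl (pvStep key) (some m) post = some m := by
  intro post
  induction post with
  | nil => intro _; rfl
  | cons y t ih =>
    intro h
    have hy : key m ≤ key y := h y (by simp)
    simp only [List.foldl_cons]
    rw [show pvStep key (some m) y = some m from by
      simp only [pvStep]; rw [if_neg (by omega)]]
    exact ih (fun z hz => h z (by simp [hz]))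

theorem pv_min?_split (key : Int → Nat) (pre post : List Int) (m : Int)
    (hpre : ∀ y ∈ pre, key m < key y) (hpost : ∀ y ∈ post, key m ≤ key y) :
    PySem.List.min? (pre ++ m :: post) key = some m := by
  rw [pv_min?_eq, List.foldl_append]
  rcases h : List.foldl (pvStep key) none pre with _ | b
  · simp only [List.foldl_cons]
    rw [show pvStep key none m = some m from rfl]
    exact pv_min?_keep key m post hpost
  · have hb : b ∈ pre := PySem.List.min?_mem (xs := pre) (key := key) (by rw [pv_min?_eq]; exact h)
    have hkb : key m < key b := hpre b hb
    simp only [List.foldl_cons]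
    rw [show pvStep key (some b) m = some m from by simp only [pvStep]; rw [if_pos hkb]]
    exact pv_min?_keep key m post hpost

-- ---- sorted-list decompositions ----

theorem pv_sorted_head (xs : List Nat) (hp : xs.Pairwise (· < ·)) (a : Nat) (ha : a ∈ xs)
    (hmin : ∀ y ∈ xs, a ≤ y) : ∃ post, xs = a :: post ∧ ∀ y ∈ post, a < y := by
  cases xs with
  | nil => simp at ha
  | cons x t =>
    have hxt := List.pairwise_cons.mp hp
    rcases List.mem_cons.mp ha with h | h
    · subst h
      exact ⟨t, rfl, hxt.1⟩
    · exfalso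
      have h1 : x < a := hxt.1 a h
      have h2 : a ≤ x := hmin x (by simp)
      omega

theorem pv_sorted_last (xs : List Nat) (hp : xs.Pairwise (· < ·)) (a : Nat) (ha : a ∈ xs)
    (hmax : ∀ y ∈ xs, y ≤ a) : ∃ pre, xs = pre ++ [a] ∧ ∀ y ∈ pre, y < a := by
  induction xs with
  | nil => simp at ha
  | cons x t ih =>
    have hxt := List.pairwise_cons.mp hp
    by_cases hat : a ∈ t
    · obtain ⟨pre', hpre', hlt⟩ := ih hxt.2 hat (fun y hy => hmax y (by simp [hy]))
      refine ⟨x :: pre', by rw [hpre']; rfl, ?_⟩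
      intro y hy
      rcases List.mem_cons.mp hy with h | h
      · subst h; exact hxt.1 a hat
      · exact hlt y h
    · have hax : a = x := by
        rcases List.mem_cons.mp ha with h | h
        · exact h
        · exact absurd h hat
      subst hax
      cases t with
      | nil => exact ⟨[], rfl, by simp⟩
      | cons b t' =>
        exfalso
        have h1 : a < b := hxt.1 b (by simp)
        have h2 : b ≤ a := hmax b (by simp)
        omega

theorem pv_sorted_split (xs : List Nat) (hp : xs.Pairwise (· < ·)) (q : Nat → Bool)
    (hdc : ∀ a b : Nat, a ≤ b → q b = true → q a = true) :
    xs = xs.filter q ++ xs.filter (fun k => ! q k) := by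
  induction xs with
  | nil => rfl
  | cons x t ih =>
    have hxt := List.pairwise_cons.mp hp
    by_cases hx : q x = true
    · rw [List.filter_cons_of_pos hx, List.filter_cons_of_neg (by simp [hx]),
        List.cons_append, ← ih hxt.2]
    · have ht : t.filter q = [] := by
        rw [List.filter_eq_nil_iff]
        intro y hy hqy
        exact hx (hdc x y (le_of_lt (hxt.1 y hy)) hqy)
      have ht2 : t.filter (fun k => ! q k) = t := by
        rw [List.filter_eq_self]
        intro y hy
        simp only [Bool.not_eq_true']
        by_contra hc
        rw [Bool.not_eq_false] at hc
        exact hx (hdc x y (le_of_lt (hxt.1 y hy)) hc)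
      rw [List.filter_cons_of_neg (by simp [hx]), ht, List.nil_append,
        List.filter_cons_of_pos (by simp [hx]), ht2]

-- ---- string-search specs ----

theorem pv_findFrom_past (l tok : List Char) (st : Int) (h0 : 0 ≤ st)
    (h : (l.length : Int) < st) : PySem.Chars.findFrom l tok st none = -1 := by
  simp only [PySem.Chars.findFrom]
  have hst : (if st < 0 then if st + (l.length : Int) < 0 then 0 else st + (l.length : Int) else st) = st := by
    rw [if_neg (by omega)]
  rw [hst, if_pos (by omega)]

theorem pv_rfind_go_spec (s sub : List Char) : ∀ j : Nat,
    (PySem.Chars.rfind.go s sub j = -1 ∧ ∀ k ≤ j, ¬ sub <+: s.drop k) ∨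
    (∃ k : Nat, PySem.Chars.rfind.go s sub j = (k : Int) ∧ k ≤ j ∧ sub <+: s.drop k ∧
      ∀ i, k < i → i ≤ j → ¬ sub <+: s.drop i) := by
  intro j
  induction j with
  | zero =>
    rw [PySem.Chars.rfind.go]
    by_cases h : sub.isPrefixOf s = true
    · right
      refine ⟨0, by rw [if_pos h]; simp, le_rfl, ?_, by omega⟩
      simpa [List.isPrefixOf_iff_prefix] using h
    · left
      refine ⟨by rw [if_neg h], ?_⟩
      intro k hk
      interval_cases k
      simpa [List.isPrefixOf_iff_prefix] using h
  | succ j ih =>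
    rw [PySem.Chars.rfind.go]
    by_cases h : sub.isPrefixOf (s.drop (j + 1)) = true
    · right
      refine ⟨j + 1, by rw [if_pos h], le_rfl, by simpa [List.isPrefixOf_iff_prefix] using h, by omega⟩
    · rw [if_neg h]
      have hnp : ¬ sub <+: s.drop (j + 1) := by
        simpa [List.isPrefixOf_iff_prefix] using h
      rcases ih with ⟨he, hall⟩ | ⟨k, he, hk, hp, hmax⟩
      · left
        refine ⟨he, ?_⟩
        intro k hk
        rcases Nat.lt_or_ge k (j + 1) with h1 | h1
        · exact hall k (by omega)
        · have : k = j + 1 := by omega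
          subst this; exact hnp
      · right
        refine ⟨k, he, by omega, hp, ?_⟩
        intro i hi1 hi2
        rcases Nat.lt_or_ge i (j + 1) with h1 | h1
        · exact hmax i hi1 (by omega)
        · have : i = j + 1 := by omega
          subst this; exact hnp

-- right neighbor: findFrom from max(near-1,0) finds the first match position ≥ that start
theorem pv_right_spec (l tok : List Char) (htok : tok ≠ []) (nr : Int) :
    (PySem.Chars.findFrom l tok (max (nr - 1) 0) none = -1 ∧
      ∀ k ∈ pvH l tok, (k : Int) < max (nr - 1) 0) ∨
    (∃ j : Nat, PySem.Chars.findFrom l tok (max (nr - 1) 0) none = (j : Int) ∧ j ∈ pvH l tok ∧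
      max (nr - 1) 0 ≤ (j : Int) ∧ ∀ k ∈ pvH l tok, max (nr - 1) 0 ≤ (k : Int) → j ≤ k) := by
  set s0 : Int := max (nr - 1) 0 with hs0
  have hs0n : 0 ≤ s0 := le_max_right _ _
  have hcast : ((s0.toNat : Nat) : Int) = s0 := Int.toNat_of_nonneg hs0n
  by_cases hle : s0.toNat ≤ l.length
  · by_cases hne : PySem.Chars.findFrom l tok s0 none = -1
    · left
      refine ⟨hne, ?_⟩
      intro k hk
      by_contra hc
      rw [not_lt] at hc
      rw [← hcast] at hne
      have hno : ¬ tok <:+: l.drop s0.toNat :=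
        (PySem.Chars.findFrom_natCast_eq_neg_one_iff l tok s0.toNat hle).mp hne
      apply hno
      have hpre : tok <+: l.drop k := (pvH_mem l tok htok k).mp hk
      have hdd : l.drop k = (l.drop s0.toNat).drop (k - s0.toNat) := by
        rw [List.drop_drop]; congr 1; omega
      rw [hdd] at hpre
      exact hpre.isInfix.trans (List.drop_suffix _ _).isInfix
    · right
      rw [← hcast] at hne ⊢
      obtain ⟨hge, hpre, hmin⟩ := PySem.Chars.findFrom_natCast_spec l tok s0.toNat hle hne
      set r := PySem.Chars.findFrom l tok ((s0.toNat : Nat) : Int) with hr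
      have hr0 : 0 ≤ r := by omega
      refine ⟨r.toNat, by omega, (pvH_mem l tok htok _).mpr hpre, by omega, ?_⟩
      intro k hk hks
      by_contra hc
      rw [not_le] at hc
      exact hmin k (by omega) hc ((pvH_mem l tok htok k).mp hk)
  · left
    have hpast : PySem.Chars.findFrom l tok s0 none = -1 :=
      pv_findFrom_past l tok s0 hs0n (by omega)
    refine ⟨hpast, ?_⟩
    intro k hk
    have : k < l.length := List.mem_range.mp (List.mem_filter.mp hk).1
    omega

-- left neighbor: the end-bounded rfind finds the last match position with column < near
theorem pv_left_spec (l tok : List Char) (htok : tok ≠ []) (nr : Int) (h2 : 2 ≤ nr) :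
    (PySem.Chars.rfindFrom l tok 0 (some (nr - 2 + tok.length)) = -1 ∧
      ∀ k ∈ pvH l tok, ¬ ((k : Int) ≤ nr - 2)) ∨
    (∃ j : Nat, PySem.Chars.rfindFrom l tok 0 (some (nr - 2 + tok.length)) = (j : Int) ∧
      j ∈ pvH l tok ∧ (j : Int) ≤ nr - 2 ∧ ∀ k ∈ pvH l tok, (k : Int) ≤ nr - 2 → k ≤ j) := by
  have hM : 1 ≤ tok.length := by
    cases tok with
    | nil => exact absurd rfl htok
    | cons a t => simp
  set e : Int := nr - 2 + tok.length with he
  have he1 : 1 ≤ e := by omega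
  set E : Int := if (l.length : Int) < e then (l.length : Int) else e with hE
  have hE0 : 0 ≤ E := by rw [hE]; split_ifs <;> omega
  have hEl : E ≤ (l.length : Int) ∧ E ≤ e ∧ ((l.length : Int) ≤ e → E = (l.length : Int)) ∧ (e ≤ (l.length : Int) → E = e) := by
    refine ⟨?_, ?_, ?_, ?_⟩ <;> (rw [hE]; split_ifs <;> omega)
  set Et : Nat := E.toNat with hEt
  have hEtc : ((Et : Nat) : Int) = E := Int.toNat_of_nonneg hE0
  have hEtn : Et ≤ l.length := by omega
  -- unfold rfindFrom into rfind.go on the truncated list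
  have hunf : PySem.Chars.rfindFrom l tok 0 (some e) =
      (if PySem.Chars.rfind (l.take Et) tok = -1 then -1
       else PySem.Chars.rfind (l.take Et) tok) := by
    simp only [PySem.Chars.rfindFrom]
    norm_num
    rw [show (if (l.length : Int) < e then (l.length : Int) else if e < 0 then (if e + (l.length : Int) < 0 then 0 else e + (l.length : Int)) else e) = E from by
      rw [hE]; split_ifs <;> omega]
    rw [if_neg (by omega)]
  have hlen : (l.take Et).length = Et := by
    rw [List.length_take]; omega
  -- occurrence inside the truncation ↔ occurrence with room before the bound
  have hbridge : ∀ k : Nat, (tok <+: (l.take Et).drop k) ↔ (tok <+: l.drop k ∧ k + tok.length ≤ Et) := by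
    intro k
    rw [List.drop_take, List.prefix_take_iff]
    constructor
    · rintro ⟨h1, h2⟩; exact ⟨h1, by omega⟩
    · rintro ⟨h1, h2⟩; exact ⟨h1, by omega⟩
  -- for a match position, room before the bound ↔ column < near
  have hroom : ∀ k ∈ pvH l tok, (k + tok.length ≤ Et ↔ (k : Int) ≤ nr - 2) := by
    intro k hk
    have hkl := pvH_mem_le l tok htok k hk
    constructor
    · intro h; omega
    · intro h
      have : ((k : Int) + tok.length ≤ e) := by omega
      omega
  have hgo : PySem.Chars.rfind (l.take Et) tok = PySem.Chars.rfind.go (l.take Et) tok Et := by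
    rw [PySem.Chars.rfind, hlen]
  rcases pv_rfind_go_spec (l.take Et) tok Et with ⟨hgoeq, hall⟩ | ⟨k, hgoeq, hkEt, hkpre, hmax⟩
  · left
    rw [hgo] at hunf
    refine ⟨by rw [hunf, if_pos hgoeq], ?_⟩
    intro k hk hc
    have hkpre : tok <+: l.drop k := (pvH_mem l tok htok k).mp hk
    have hkroom : k + tok.length ≤ Et := (hroom k hk).mpr hc
    exact hall k (by omega) ((hbridge k).mpr ⟨hkpre, hkroom⟩)
  · right
    rw [hgo] at hunf
    obtain ⟨hkp, hkr⟩ := (hbridge k).mp hkpre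
    have hkH : k ∈ pvH l tok := (pvH_mem l tok htok k).mpr hkp
    refine ⟨k, ?_, hkH, (hroom k hkH).mp hkr, ?_⟩
    · rw [hunf, hgoeq, if_neg (by omega)]
    · intro k' hk' hc
      by_contra hlt
      rw [not_le] at hlt
      have hk'pre : tok <+: l.drop k' := (pvH_mem l tok htok k').mp hk'
      have hk'room : k' + tok.length ≤ Et := (hroom k' hk').mpr hc
      exact hmax k' hlt (by omega) ((hbridge k').mpr ⟨hk'pre, hk'room⟩)

-- key monotonicity facts are discharged inline by omega (natAbs is omega-native)

-- ===== VERDICT (by name: the statement is the Claim_ definition above) =====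
theorem find_token_col_in_src_py_spec : Claim_equal_find_token_col_in_src_py := by
  intro line_str token_spelling near_col_1based _
  unfold Spec_find_token_col_in_src_py find_token_col_in_src_py find_token_col_in_src_py_alt
  by_cases hg : line_str = "" || token_spelling = ""
  · simp [hg]
  · rw [if_neg hg, if_neg hg]
    have htok : token_spelling.toList ≠ [] := by
      intro h
      simp only [Bool.or_eq_true, decide_eq_true_eq, not_or] at hg
      exact hg.2 (by cases token_spelling; simpa using h)
    cases near_col_1based with
    | none =>
      dsimp only
      simp only [PySem.Str.find_eq]
      rw [pv_hits_eq line_str.toList token_spelling.toList htok]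
      by_cases hf : PySem.Chars.find line_str.toList token_spelling.toList = -1
      · have hH : pvH line_str.toList token_spelling.toList = [] := by
          rw [List.eq_nil_iff_forall_not_mem]
          intro k hk
          have hp := (pvH_mem line_str.toList token_spelling.toList htok k).mp hk
          exact (PySem.Chars.find_eq_neg_one_iff line_str.toList token_spelling.toList).mp hf
            (hp.isInfix.trans (List.drop_suffix _ _).isInfix)
        rw [hH, hf]
        norm_num
      · have hf0 : 0 ≤ PySem.Chars.find line_str.toList token_spelling.toList := by
          have := PySem.Chars.neg_one_le_find line_str.toList token_spelling.toList; omega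
        obtain ⟨hpre, hmin⟩ := PySem.Chars.find_spec hf0
        have hfH : (PySem.Chars.find line_str.toList token_spelling.toList).toNat ∈ pvH line_str.toList token_spelling.toList :=
          (pvH_mem line_str.toList token_spelling.toList htok _).mpr hpre
        have hhead : ∀ y ∈ pvH line_str.toList token_spelling.toList,
            (PySem.Chars.find line_str.toList token_spelling.toList).toNat ≤ y := by
          intro y hy
          by_contra hc
          rw [not_le] at hc
          exact hmin y hc ((pvH_mem line_str.toList token_spelling.toList htok y).mp hy)
        obtain ⟨post, hpost, _⟩ := pv_sorted_head (pvH line_str.toList token_spelling.toList)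
          (pvH_pairwise line_str.toList token_spelling.toList) _ hfH hhead
        rw [hpost, if_neg (by simp), if_pos hf0]
        have hF : pvF (PySem.Chars.find line_str.toList token_spelling.toList).toNat
            = PySem.Chars.find line_str.toList token_spelling.toList + 1 := by
          unfold pvF; omega
        simp [PySem.List.pyGet?, PySem.List.pyIdx?, hF]
    | some nc =>
      dsimp only
      simp only [PySem.Str.findFrom_eq, PySem.Str.rfindFrom_eq, PySem.Str.len_eq]
      rw [pv_hits_eq line_str.toList token_spelling.toList htok]
      obtain ⟨q, hq⟩ : ∃ q : Nat → Bool, q = fun (k : Nat) => decide ((k : Int) ≤ nc - 2) := ⟨_, rfl⟩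
      have hdc : ∀ a b : Nat, a ≤ b → q b = true → q a = true := by
        intro a b hab h
        rw [hq] at h ⊢
        simp only [decide_eq_true_eq] at h ⊢
        omega
      have hsplit := pv_sorted_split (pvH line_str.toList token_spelling.toList)
        (pvH_pairwise line_str.toList token_spelling.toList) q hdc
      obtain ⟨lows, hlows⟩ : ∃ L, L = (pvH line_str.toList token_spelling.toList).filter q := ⟨_, rfl⟩
      obtain ⟨highs, hhighs⟩ : ∃ H, H = (pvH line_str.toList token_spelling.toList).filter (fun k => ! q k) := ⟨_, rfl⟩
      rw [← hlows, ← hhighs] at hsplit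
      have hlowmem : ∀ y ∈ lows, y ∈ pvH line_str.toList token_spelling.toList ∧ (y : Int) ≤ nc - 2 := by
        intro y hy
        rw [hlows] at hy
        have h := List.mem_filter.mp hy
        have h2 := h.2
        rw [hq] at h2
        simp only [decide_eq_true_eq] at h2
        exact ⟨h.1, h2⟩
      have hhighmem : ∀ y ∈ highs, y ∈ pvH line_str.toList token_spelling.toList ∧ nc - 2 < (y : Int) := by
        intro y hy
        rw [hhighs] at hy
        have h := List.mem_filter.mp hy
        refine ⟨h.1, ?_⟩
        have h2 := h.2
        rw [hq] at h2
        simp only [Bool.not_eq_eq_eq_not, Bool.not_true, decide_eq_false_iff_not, not_le] at h2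
        exact h2
      have hlowpair : lows.Pairwise (· < ·) := by
        rw [hlows]; exact (pvH_pairwise _ _).filter _
      have hhighpair : highs.Pairwise (· < ·) := by
        rw [hhighs]; exact (pvH_pairwise _ _).filter _
      have HL : ((if 2 ≤ nc then PySem.Chars.rfindFrom line_str.toList token_spelling.toList 0 (some (nc - 2 + (token_spelling.toList.length : Int))) else -1) = -1 ∧ lows = []) ∨
          (∃ Lk : Nat, (if 2 ≤ nc then PySem.Chars.rfindFrom line_str.toList token_spelling.toList 0 (some (nc - 2 + (token_spelling.toList.length : Int))) else -1) = (Lk : Int) ∧ Lk ∈ lows ∧ ∀ y ∈ lows, y ≤ Lk) := by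
        by_cases h2 : 2 ≤ nc
        · rw [if_pos h2]
          rcases pv_left_spec line_str.toList token_spelling.toList htok nc h2 with
            ⟨hneg, hnone⟩ | ⟨j, hj, hjH, hjle, hjmax⟩
          · left
            refine ⟨hneg, ?_⟩
            rw [hlows, List.filter_eq_nil_iff]
            intro k hk
            rw [hq]
            simp only [decide_eq_true_eq]
            exact hnone k hk
          · right
            refine ⟨j, hj, ?_, ?_⟩
            · rw [hlows]
              exact List.mem_filter.mpr ⟨hjH, by rw [hq]; simp only [decide_eq_true_eq]; exact hjle⟩
            · intro y hy
              exact hjmax y (hlowmem y hy).1 (hlowmem y hy).2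
        · rw [if_neg h2]
          left
          refine ⟨rfl, ?_⟩
          rw [hlows, List.filter_eq_nil_iff]
          intro k hk
          rw [hq]
          simp only [decide_eq_true_eq]
          omega
      have HR : (PySem.Chars.findFrom line_str.toList token_spelling.toList (max (nc - 1) 0) none = -1 ∧ highs = []) ∨
          (∃ Rk : Nat, PySem.Chars.findFrom line_str.toList token_spelling.toList (max (nc - 1) 0) none = (Rk : Int) ∧ Rk ∈ highs ∧ ∀ y ∈ highs, Rk ≤ y) := by
        rcases pv_right_spec line_str.toList token_spelling.toList htok nc with
          ⟨hneg, hnone⟩ | ⟨j, hj, hjH, hjge, hjmin⟩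
        · left
          refine ⟨hneg, ?_⟩
          rw [hhighs, List.filter_eq_nil_iff]
          intro k hk
          have hlt := hnone k hk
          rw [max_def] at hlt
          rw [hq]
          simp only [Bool.not_eq_eq_eq_not, Bool.not_true, decide_eq_false_iff_not, not_le, not_lt]
          split_ifs at hlt <;> omega
        · right
          refine ⟨j, hj, ?_, ?_⟩
          · rw [hhighs]
            refine List.mem_filter.mpr ⟨hjH, ?_⟩
            rw [max_def] at hjge
            rw [hq]
            simp only [Bool.not_eq_eq_eq_not, Bool.not_true, decide_eq_false_iff_not, not_le]
            split_ifs at hjge <;> omega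
          · intro y hy
            refine hjmin y (hhighmem y hy).1 ?_
            have h5 := (hhighmem y hy).2
            rw [max_def]
            split_ifs <;> omega
      rcases HL with ⟨hL1, hL2⟩ | ⟨Lk, hLk, hLmem, hLmax⟩ <;>
        rcases HR with ⟨hR1, hR2⟩ | ⟨Rk, hRk, hRmem, hRmin⟩
      · -- no hit at all
        rw [hsplit, hL2, hR2]
        simp only [hL1, hR1]
        norm_num
      · -- only the right neighbor exists: the first hit column is nearest
        obtain ⟨postR, hpostR, hgt⟩ := pv_sorted_head highs hhighpair Rk hRmem hRmin
        rw [hsplit, hL2, hpostR, List.nil_append]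
        simp only [hL1, hRk]
        have hRhigh := hhighmem Rk hRmem
        rw [if_neg (by simp)]
        have hmin := pv_min?_split (fun c => (c - nc).natAbs) [] (postR.map pvF) (pvF Rk)
          (by simp) ?_
        · rw [List.nil_append] at hmin
          rw [List.map_cons, hmin]
          rw [if_neg (by simp only [Bool.and_eq_true, decide_eq_true_eq]; rintro ⟨-, h⟩; omega)]
          rw [if_pos (by norm_num)]
          simp [pvF]
        · intro y hy
          obtain ⟨p, hp, hpy⟩ := List.mem_map.mp hy
          have hpmem := hhighmem p (by rw [hpostR]; exact List.mem_cons_of_mem _ hp)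
          have hplt := hgt p hp
          subst hpy
          simp only [pvF]
          omega
      · -- only the left neighbor exists: the last hit column is nearest
        obtain ⟨preL, hpreL, hltL⟩ := pv_sorted_last lows hlowpair Lk hLmem hLmax
        rw [hsplit, hR2, List.append_nil, hpreL]
        simp only [hLk, hR1]
        have hLlow := hlowmem Lk hLmem
        rw [if_neg (by simp)]
        have hmin := pv_min?_split (fun c => (c - nc).natAbs) (preL.map pvF) [] (pvF Lk) ?_ (by simp)
        · rw [List.map_append, List.map_singleton]
          rw [show (preL.map pvF) ++ [pvF Lk] = (preL.map pvF) ++ pvF Lk :: [] from rfl, hmin]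
          rw [if_neg (by simp only [Bool.and_eq_true, decide_eq_true_eq]; rintro ⟨h, -⟩; omega)]
          rw [if_neg (by omega), if_pos (by norm_num)]
          simp [pvF]
        · intro y hy
          obtain ⟨p, hp, hpy⟩ := List.mem_map.mp hy
          have hpmem := hlowmem p (by rw [hpreL]; exact List.mem_append_left _ hp)
          have hplt := hltL p hp
          subst hpy
          simp only [pvF]
          omega
      · -- both neighbors exist: compare distances (ties go to the left column)
        obtain ⟨preL, hpreL, hltL⟩ := pv_sorted_last lows hlowpair Lk hLmem hLmax
        obtain ⟨postR, hpostR, hgtR⟩ := pv_sorted_head highs hhighpair Rk hRmem hRmin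
        have hLlow := hlowmem Lk hLmem
        have hRhigh := hhighmem Rk hRmem
        rw [hsplit, hpreL, hpostR]
        simp only [hLk, hRk]
        rw [if_neg (by simp)]
        rw [if_neg (by simp only [Bool.and_eq_true, decide_eq_true_eq]; rintro ⟨h, -⟩; omega)]
        rw [if_neg (by omega), if_neg (by omega)]
        by_cases hch : nc - ((Lk : Int) + 1) ≤ ((Rk : Int) + 1) - nc
        · -- left neighbor wins (ties included)
          rw [if_pos hch]
          have hmin := pv_min?_split (fun c => (c - nc).natAbs) (preL.map pvF)
            ((Rk :: postR).map pvF) (pvF Lk) ?_ ?_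
          · have hshape : ((preL ++ [Lk]) ++ Rk :: postR).map pvF
                = preL.map pvF ++ pvF Lk :: (Rk :: postR).map pvF := by
              simp [List.append_assoc]
            rw [hshape, hmin]
            simp [pvF]
          · intro y hy
            obtain ⟨p, hp, hpy⟩ := List.mem_map.mp hy
            have hpmem := hlowmem p (by rw [hpreL]; exact List.mem_append_left _ hp)
            have hplt := hltL p hp
            subst hpy
            simp only [pvF]
            omega
          · intro y hy
            obtain ⟨p, hp, hpy⟩ := List.mem_map.mp hy
            have hpmem := hhighmem p (by rw [hpostR]; exact hp)
            have hpge : Rk ≤ p := hRmin p (by rw [hpostR]; exact hp)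
            subst hpy
            simp only [pvF]
            omega
        · -- right neighbor is strictly closer
          rw [if_neg hch]
          have hmin := pv_min?_split (fun c => (c - nc).natAbs) ((preL ++ [Lk]).map pvF)
            (postR.map pvF) (pvF Rk) ?_ ?_
          · have hshape : ((preL ++ [Lk]) ++ Rk :: postR).map pvF
                = (preL ++ [Lk]).map pvF ++ pvF Rk :: postR.map pvF := by
              simp
            rw [hshape, hmin]
            simp [pvF]
          · intro y hy
            obtain ⟨p, hp, hpy⟩ := List.mem_map.mp hy
            have hpmem := hlowmem p (by rw [hpreL]; exact hp)
            have hple : p ≤ Lk := hLmax p (by rw [hpreL]; exact hp)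
            subst hpy
            simp only [pvF]
            omega
          · intro y hy
            obtain ⟨p, hp, hpy⟩ := List.mem_map.mp hy
            have hpmem := hhighmem p (by rw [hpostR]; exact List.mem_cons_of_mem _ hp)
            have hpgt := hgtR p hp
            subst hpy
            simp only [pvF]
            omega
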